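-- pv_equiv track=rewrite | github.com/parc-nsi/PCSI | TP10/corrige/I1-TP-10-Listes_de_Listes-corrige.py | cout_regulation
-- ===== SOURCE A (Python) =====
-- conflit = [ [  0,  0,  0,100,100,  0,  0,150,  0],
--             [  0,  0,  0,  0,  0, 50,  0,  0,  0],
--             [  0,  0,  0,  0,200,  0,  0,300, 50],
--             [100,  0,  0,  0,  0,  0,400,  0,  0],
--             [100,  0,200,  0,  0,  0,200,  0,100],
--             [  0, 50,  0,  0,  0,  0,  0,  0,  0],
--             [  0,  0,  0,400,200,  0,  0,  0,  0],
--             [150,  0,300,  0,  0,  0,  0,  0,  0],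
--             [  0,  0, 50,  0,100,  0,  0,  0,  0] ]
--
-- def cout_regulation(regulation):
--     cout = 0
--     n = len(regulation)
--     sommet = [3*k + regulation[k] for k in range(n)]
--     for k in range(n - 1):
--         s = sommet[k]
--         for j in range(k + 1, n):
--             cout += conflit[s][sommet[j]]
--     return cout
-- ===== SOURCE B (Python) =====
-- conflit = [ [  0,  0,  0,100,100,  0,  0,150,  0],
--             [  0,  0,  0,  0,  0, 50,  0,  0,  0],
--             [  0,  0,  0,  0,200,  0,  0,300, 50],
--             [100,  0,  0,  0,  0,  0,400,  0,  0],
--             [100,  0,200,  0,  0,  0,200,  0,100],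
--             [  0, 50,  0,  0,  0,  0,  0,  0,  0],
--             [  0,  0,  0,400,200,  0,  0,  0,  0],
--             [150,  0,300,  0,  0,  0,  0,  0,  0],
--             [  0,  0, 50,  0,100,  0,  0,  0,  0] ]
--
-- def cout_regulation(regulation):
--     # Bucket-count the vertices by their residue class modulo 9 (Python indexing into
--     # the 9-row matrix is exactly index % 9), then charge each pair of distinct
--     # classes once; same-class pairs cost nothing since the diagonal is zero.
--     cnt = {}
--     for k, r in enumerate(regulation):
--         c = (3 * k + r) % 9
--         cnt[c] = cnt.get(c, 0) + 1
--     total = 0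
--     for u in range(9):
--         for v in range(u + 1, 9):
--             total += conflit[u][v] * cnt.get(u, 0) * cnt.get(v, 0)
--     return total
-- ===== Notes on version B (the rewrite author's own statement) =====
-- stated objective: faster
-- what changed: Instead of A's nested loop over all pairs of vertices, B counts in one pass how many vertices fall in each of the 9 residue classes modulo 9 (Python's list indexing into the 9-row matrix is exactly index % 9) and then sums conflit[u][v]*cnt[u]*cnt[v] over the fixed 36 class pairs; same-class pairs cost nothing since the diagonal is zero.
import Mathlib
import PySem

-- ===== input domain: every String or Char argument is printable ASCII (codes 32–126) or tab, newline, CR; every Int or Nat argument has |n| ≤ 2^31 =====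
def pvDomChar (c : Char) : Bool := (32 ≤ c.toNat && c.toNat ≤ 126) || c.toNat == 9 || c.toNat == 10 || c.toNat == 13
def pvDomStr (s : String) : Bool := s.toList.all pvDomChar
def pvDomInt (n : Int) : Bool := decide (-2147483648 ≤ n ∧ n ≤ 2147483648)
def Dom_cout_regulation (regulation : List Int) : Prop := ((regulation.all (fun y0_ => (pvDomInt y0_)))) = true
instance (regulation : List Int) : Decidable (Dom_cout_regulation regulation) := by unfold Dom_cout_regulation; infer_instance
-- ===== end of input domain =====

-- B bucket-counts the vertices by residue class modulo 9 (Python's indexing into the fixed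
-- 9-row matrix is exactly index % 9) and charges each pair of distinct classes once,
-- instead of A's loop over all pairs of vertices; return value only.


-- the module-level conflict matrix `conflit` (shared context of both programs)
def conflitL : List (List Int) :=
  [ [  0,  0,  0,100,100,  0,  0,150,  0],
    [  0,  0,  0,  0,  0, 50,  0,  0,  0],
    [  0,  0,  0,  0,200,  0,  0,300, 50],
    [100,  0,  0,  0,  0,  0,400,  0,  0],
    [100,  0,200,  0,  0,  0,200,  0,100],
    [  0, 50,  0,  0,  0,  0,  0,  0,  0],
    [  0,  0,  0,400,200,  0,  0,  0,  0],
    [150,  0,300,  0,  0,  0,  0,  0,  0],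
    [  0,  0, 50,  0,100,  0,  0,  0,  0] ]

-- ===== PORT A =====
def cout_regulation (regulation : List Int) : Int :=
  let n : Int := (regulation.length : Int)
  let sommet : List Int := (PySem.List.pyRange 0 n 1).map
    (fun k => 3 * k + PySem.List.pyGetD regulation k 0)
  (PySem.List.pyRange 0 (n - 1) 1).foldl (fun cout k =>
    let s := PySem.List.pyGetD sommet k 0
    (PySem.List.pyRange (k + 1) n 1).foldl (fun cout j =>
      cout + PySem.List.pyGetD (PySem.List.pyGetD conflitL s [])
               (PySem.List.pyGetD sommet j 0) 0) cout) 0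

-- ===== PORT B =====
def cout_regulation_alt (regulation : List Int) : Int :=
  let cnt : PySem.Dict Int Int :=
    (PySem.List.enumerate regulation).foldl
      (fun d kr =>
        let c := PySem.Int.mod (3 * kr.1 + kr.2) 9
        d.insert c (d.getD c 0 + 1)) PySem.Dict.empty
  (PySem.List.pyRange 0 9 1).foldl (fun total u =>
    (PySem.List.pyRange (u + 1) 9 1).foldl (fun total v =>
      total + PySem.List.pyGetD (PySem.List.pyGetD conflitL u []) v 0
                * cnt.getD u 0 * cnt.getD v 0) total) 0

-- ===== PRECONDITION & SPEC =====
-- Pre_ excludes exactly the inputs on which Python A raises IndexError: a list of length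
-- ≥ 2 in which some vertex index 3*i + regulation[i] is outside the range -9 … 8 accepted
-- by Python list indexing into the 9×9 matrix.
def Pre_cout_regulation (regulation : List Int) : Prop :=
  regulation.length ≤ 1 ∨
    ∀ i < regulation.length,
      -9 ≤ 3 * (i : Int) + regulation.getD i 0 ∧ 3 * (i : Int) + regulation.getD i 0 ≤ 8
instance (regulation : List Int) : Decidable (Pre_cout_regulation regulation) := by
  unfold Pre_cout_regulation; infer_instance

def pvWitness_cout_regulation : List Int := [2, -1, 0]

def Spec_cout_regulation (regulation : List Int) (out : Int) : Prop := out = cout_regulation_alt regulation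
instance (regulation : List Int) (out : Int) : Decidable (Spec_cout_regulation regulation out) := by unfold Spec_cout_regulation; infer_instance

-- ===== CLAIM (what is proved, stated in full; the proofs are below) =====
def Claim_equal_cout_regulation : Prop := ∀ (regulation : List Int), Dom_cout_regulation regulation → Pre_cout_regulation regulation → Spec_cout_regulation regulation (cout_regulation regulation)

-- ===== LEMMAS AND PROOFS =====

-- proof-side names for the matrix lookup, the vertex function, and its residue class
def gf (s t : Int) : Int :=
  PySem.List.pyGetD (PySem.List.pyGetD conflitL s []) t 0
def wf (regulation : List Int) (i : Int) : Int :=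
  3 * i + PySem.List.pyGetD regulation i 0
def mI (regulation : List Int) (i : Int) : Int :=
  PySem.Int.mod (wf regulation i) 9

-- matrix facts, checked over the finite index ranges
lemma gf_mod_all : ∀ s ∈ PySem.List.pyRange (-9) 9 1, ∀ t ∈ PySem.List.pyRange (-9) 9 1,
    gf s t = gf (PySem.Int.mod s 9) (PySem.Int.mod t 9) := by decide

lemma gf_symm9 : ∀ u ∈ Finset.range 9, ∀ v ∈ Finset.range 9,
    gf (u : Int) (v : Int) = gf (v : Int) (u : Int) := by decide

lemma gf_diag9 : ∀ u ∈ Finset.range 9, gf (u : Int) (u : Int) = 0 := by decide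

lemma sum_map_range_int (f : Nat → Int) (N : Nat) :
    ((List.range N).map f).sum = ∑ i ∈ Finset.range N, f i := by
  induction N with
  | zero => simp
  | succ n ih =>
      rw [List.range_succ, List.map_append, List.sum_append, Finset.sum_range_succ, ih]
      simp

-- bridge: a summed comprehension over range(a, b) as a Finset.range sum with a guard
lemma sum_pyRange_to_range (f : Int → Int) (a b : Int) (ha : 0 ≤ a) :
    ((PySem.List.pyRange a b 1).map f).sum
      = ∑ j ∈ Finset.range b.toNat, if a ≤ (j : Int) then f j else 0 := by
  rw [PySem.List.pyRange_one, List.map_map, sum_map_range_int]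
  rcases (by omega : b ≤ a ∨ a < b) with hba | hab
  · have h0 : (b - a).toNat = 0 := by omega
    rw [h0]
    simp only [Finset.range_zero, Finset.sum_empty]
    symm
    apply Finset.sum_eq_zero
    intro j hj
    rw [Finset.mem_range] at hj
    rw [if_neg (by omega)]
  · have hrhs : (∑ j ∈ Finset.range b.toNat, if a ≤ (j : Int) then f j else 0)
        = ∑ j ∈ Finset.Ico a.toNat b.toNat, f j := by
      rw [Finset.range_eq_Ico,
          ← Finset.sum_Ico_consecutive _ (Nat.zero_le a.toNat) (by omega : a.toNat ≤ b.toNat)]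
      have hz : (∑ j ∈ Finset.Ico 0 a.toNat, if a ≤ (j : Int) then f j else 0) = 0 := by
        apply Finset.sum_eq_zero
        intro j hj
        rw [Finset.mem_Ico] at hj
        rw [if_neg (by omega)]
      rw [hz, zero_add]
      apply Finset.sum_congr rfl
      intro j hj
      rw [Finset.mem_Ico] at hj
      rw [if_pos (by omega : a ≤ (j : Int))]
    rw [hrhs, Finset.sum_Ico_eq_sum_range]
    apply Finset.sum_congr
    · congr 1
      omega
    · intro k hk
      simp only [Function.comp_apply]
      congr 1
      omega

-- looking up sommet = [3*k + regulation[k] for k in range(n)] at a valid index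
lemma sommet_lookup (reg : List Int) (i : Int) (h0 : 0 ≤ i) (h1 : i < (reg.length : Int)) :
    PySem.List.pyGetD
      ((PySem.List.pyRange 0 (reg.length : Int) 1).map
        (fun k => 3 * k + PySem.List.pyGetD reg k 0)) i 0 = wf reg i := by
  rw [PySem.List.pyGetD_map_pyRange_of_nonneg _ _ _ _ h0 h1]
  rfl

-- characterisation of port A as a guarded double Finset sum
lemma cout_regulation_char (reg : List Int) :
    cout_regulation reg =
      ∑ i ∈ Finset.range reg.length, ∑ j ∈ Finset.range reg.length,
        if i < j then gf (wf reg (i : Int)) (wf reg (j : Int)) else 0 := by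
  unfold cout_regulation
  simp only [PySem.List.foldl_add, zero_add]
  rw [sum_pyRange_to_range _ 0 _ le_rfl]
  simp only [Int.natCast_nonneg, if_true]
  have key : ∀ i : Nat, i < reg.length →
      ((PySem.List.pyRange ((i : Int) + 1) (reg.length : Int) 1).map (fun j =>
          PySem.List.pyGetD
            (PySem.List.pyGetD conflitL
              (PySem.List.pyGetD
                ((PySem.List.pyRange 0 (reg.length : Int) 1).map
                  (fun k => 3 * k + PySem.List.pyGetD reg k 0)) (i : Int) 0) [])
            (PySem.List.pyGetD
              ((PySem.List.pyRange 0 (reg.length : Int) 1).map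
                (fun k => 3 * k + PySem.List.pyGetD reg k 0)) j 0) 0)).sum
      = ∑ j ∈ Finset.range reg.length,
          if i < j then gf (wf reg (i : Int)) (wf reg (j : Int)) else 0 := by
    intro i hi
    rw [sommet_lookup reg (i : Int) (by omega) (by exact_mod_cast hi)]
    have hmap : (PySem.List.pyRange ((i : Int) + 1) (reg.length : Int) 1).map (fun j =>
          PySem.List.pyGetD (PySem.List.pyGetD conflitL (wf reg (i : Int)) [])
            (PySem.List.pyGetD
              ((PySem.List.pyRange 0 (reg.length : Int) 1).map
                (fun k => 3 * k + PySem.List.pyGetD reg k 0)) j 0) 0)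
        = (PySem.List.pyRange ((i : Int) + 1) (reg.length : Int) 1).map
            (fun j => gf (wf reg (i : Int)) (wf reg j)) := by
      apply List.map_congr_left
      intro j hj
      rw [PySem.List.mem_pyRange_one] at hj
      rw [sommet_lookup reg j (by omega) hj.2]
      rfl
    rw [hmap, sum_pyRange_to_range _ _ _ (by omega : (0 : Int) ≤ (i : Int) + 1),
        Int.toNat_natCast]
    apply Finset.sum_congr rfl
    intro j _
    by_cases h : i < j
    · rw [if_pos (by omega : (i : Int) + 1 ≤ (j : Int)), if_pos h]
    · rw [if_neg (by omega : ¬ ((i : Int) + 1 ≤ (j : Int))), if_neg h]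
  rw [Finset.sum_congr rfl (fun i hi => key i (by rw [Finset.mem_range] at hi; omega))]
  rcases Nat.eq_zero_or_pos reg.length with h0 | h0
  · rw [h0]
    norm_num
  · obtain ⟨M, hM⟩ : ∃ M, reg.length = M + 1 := ⟨reg.length - 1, by omega⟩
    rw [hM]
    have htn : (((M + 1 : Nat) : Int) - 1).toNat = M := by omega
    rw [htn, Finset.sum_range_succ (n := M)]
    have hlast : (∑ j ∈ Finset.range (M + 1),
        if M < j then gf (wf reg (M : Int)) (wf reg (j : Int)) else 0) = 0 := by
      apply Finset.sum_eq_zero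
      intro j hj
      rw [Finset.mem_range] at hj
      rw [if_neg (by omega)]
    rw [hlast, add_zero]

-- the residue-class count, as a Finset sum
def cntI (reg : List Int) (x : Int) : Int :=
  ∑ i ∈ Finset.range reg.length, if mI reg (i : Int) = x then 1 else 0

lemma countP_range_cast (p : Nat → Bool) (n : Nat) :
    ((List.range n).countP p : Int) = ∑ i ∈ Finset.range n, if p i then 1 else 0 := by
  induction n with
  | zero => simp
  | succ m ih =>
      rw [List.range_succ, List.countP_append, Finset.sum_range_succ, ← ih]
      by_cases h : p m <;> simp [h]

-- B's dict of counts looks up to the residue-class count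
lemma cnt_getD (reg : List Int) (x : Int) :
    ((PySem.List.enumerate reg).foldl
      (fun (d : PySem.Dict Int Int) kr =>
        let c := PySem.Int.mod (3 * kr.1 + kr.2) 9
        d.insert c (d.getD c 0 + 1)) PySem.Dict.empty).getD x 0 = cntI reg x := by
  show (List.foldl (fun (d : PySem.Dict Int Int) (kr : Int × Int) =>
      d.insert (PySem.Int.mod (3 * kr.1 + kr.2) 9)
        (d.getD (PySem.Int.mod (3 * kr.1 + kr.2) 9) 0 + 1)) PySem.Dict.empty
      (PySem.List.enumerate reg)).getD x 0 = cntI reg x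
  have h1 : ((PySem.List.enumerate reg).map
          (fun kr => PySem.Int.mod (3 * kr.1 + kr.2) 9)).foldl
          (fun (d : PySem.Dict Int Int) c => d.insert c (d.getD c 0 + 1)) PySem.Dict.empty
      = (PySem.List.enumerate reg).foldl (fun (d : PySem.Dict Int Int) (kr : Int × Int) =>
          d.insert (PySem.Int.mod (3 * kr.1 + kr.2) 9)
            (d.getD (PySem.Int.mod (3 * kr.1 + kr.2) 9) 0 + 1)) PySem.Dict.empty :=
    List.foldl_map
  rw [← h1, PySem.Dict.foldl_insert_getD_add_one_eq_counter, PySem.Dict.getD_counter]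
  have h2 : (PySem.List.enumerate reg).map (fun kr => PySem.Int.mod (3 * kr.1 + kr.2) 9)
      = (List.range reg.length).map (fun (i : Nat) => mI reg ((i : Nat) : Int)) := by
    rw [PySem.List.enumerate_eq_map_pyRange reg 0, List.map_map]
    have hlen : PySem.List.len reg = ((reg.length : Nat) : Int) := by simp [PySem.List.len]
    rw [hlen, PySem.List.pyRange_zero_natCast, List.map_map]
    rfl
  rw [h2, List.count_eq_countP, List.countP_map, countP_range_cast, cntI]
  apply Finset.sum_congr rfl
  intro i _
  simp only [Function.comp_apply, beq_iff_eq]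

-- characterisation of port B as a guarded double Finset sum over the 9 residue classes
lemma cout_regulation_alt_char (reg : List Int) :
    cout_regulation_alt reg =
      ∑ u ∈ Finset.range 9, ∑ v ∈ Finset.range 9,
        if u < v then gf (u : Int) (v : Int) * cntI reg (u : Int) * cntI reg (v : Int)
        else 0 := by
  unfold cout_regulation_alt
  simp only [cnt_getD, PySem.List.foldl_add, zero_add]
  rw [sum_pyRange_to_range _ 0 _ le_rfl]
  norm_num
  apply Finset.sum_congr rfl
  intro u hu
  rw [sum_pyRange_to_range _ _ _ (by omega : (0 : Int) ≤ (u : Int) + 1)]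
  norm_num
  apply Finset.sum_congr rfl
  intro v hv
  congr 1
  simp [gf, PySem.List.pyGetD_natCast, List.getD]

-- collapsing an indicator sum over the 9 classes at a bounded value
lemma collapse9 (x : Int) (h0 : 0 ≤ x) (h9 : x < 9) (F : Nat → Int) :
    (∑ u ∈ Finset.range 9, if x = (u : Int) then F u else 0) = F x.toNat := by
  have hcong : ∀ u ∈ Finset.range 9,
      (if x = (u : Int) then F u else 0) = (if x.toNat = u then F u else 0) := by
    intro u _
    congr 1
    simp only [eq_iff_iff]
    constructor <;> intro h <;> omega
  rw [Finset.sum_congr rfl hcong, Finset.sum_ite_eq,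
      if_pos (by rw [Finset.mem_range]; omega)]

-- class counts and directed pair counts for the combinatorial identity
def Cf (n : Nat) (m : Nat → Int) (u : Nat) : Int :=
  ∑ i ∈ Finset.range n, if m i = (u : Int) then 1 else 0
def Nf (n : Nat) (m : Nat → Int) (u v : Nat) : Int :=
  ∑ i ∈ Finset.range n, ∑ j ∈ Finset.range n,
    if i < j ∧ m i = (u : Int) ∧ m j = (v : Int) then 1 else 0

-- the two directed pair counts of distinct classes multiply out to the class counts
lemma Nf_add (n : Nat) (m : Nat → Int) (u v : Nat) (huv : u ≠ v) :
    Nf n m u v + Nf n m v u = Cf n m u * Cf n m v := by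
  have hswap : Nf n m v u = ∑ i ∈ Finset.range n, ∑ j ∈ Finset.range n,
      if j < i ∧ m j = (v : Int) ∧ m i = (u : Int) then 1 else 0 := by
    rw [Nf, Finset.sum_comm]
  rw [Nf, hswap, ← Finset.sum_add_distrib]
  have h1 : ∀ i ∈ Finset.range n,
      ((∑ j ∈ Finset.range n, if i < j ∧ m i = (u : Int) ∧ m j = (v : Int) then 1 else 0)
        + ∑ j ∈ Finset.range n, if j < i ∧ m j = (v : Int) ∧ m i = (u : Int) then 1 else 0)
      = ∑ j ∈ Finset.range n, if m i = (u : Int) ∧ m j = (v : Int) then (1 : Int) else 0 := by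
    intro i _
    rw [← Finset.sum_add_distrib]
    apply Finset.sum_congr rfl
    intro j _
    by_cases hA : m i = (u : Int)
    · by_cases hB : m j = (v : Int)
      · have hij : i ≠ j := by
          intro h
          apply huv
          have : ((u : Int)) = (v : Int) := by rw [← hA, h, hB]
          exact_mod_cast this
        rcases Nat.lt_trichotomy i j with h | h | h
        · rw [if_pos ⟨h, hA, hB⟩, if_neg (by omega), if_pos ⟨hA, hB⟩, add_zero]
        · exact absurd h hij
        · rw [if_neg (by omega), if_pos ⟨h, hB, hA⟩, if_pos ⟨hA, hB⟩, zero_add]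
      · simp [hB]
    · simp [hA]
  rw [Finset.sum_congr rfl h1]
  have h2 : ∀ i ∈ Finset.range n,
      (∑ j ∈ Finset.range n, if m i = (u : Int) ∧ m j = (v : Int) then (1 : Int) else 0)
      = (if m i = (u : Int) then (1 : Int) else 0) * Cf n m v := by
    intro i _
    by_cases hA : m i = (u : Int)
    · simp only [hA, true_and, if_pos trivial, one_mul, Cf]
    · simp [hA]
  rw [Finset.sum_congr rfl h2, ← Finset.sum_mul, Cf]
  rfl

-- main combinatorial identity: a triangular pair sum grouped by class counts
lemma pair_sum_by_class (n : Nat) (m : Nat → Int) (hm : ∀ i, i < n → 0 ≤ m i ∧ m i < 9) :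
    (∑ i ∈ Finset.range n, ∑ j ∈ Finset.range n, if i < j then gf (m i) (m j) else 0)
      = ∑ u ∈ Finset.range 9, ∑ v ∈ Finset.range 9,
          if u < v then gf (u : Int) (v : Int)
              * (∑ i ∈ Finset.range n, if m i = (u : Int) then 1 else 0)
              * (∑ j ∈ Finset.range n, if m j = (v : Int) then 1 else 0)
          else 0 := by
  have point : ∀ i ∈ Finset.range n, ∀ j ∈ Finset.range n,
      (if i < j then gf (m i) (m j) else 0)
        = ∑ u ∈ Finset.range 9, ∑ v ∈ Finset.range 9,
            gf (u : Int) (v : Int) * (if i < j ∧ m i = (u : Int) ∧ m j = (v : Int) then 1 else 0) := by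
    intro i hi j hj
    rw [Finset.mem_range] at hi hj
    have h1 := hm i hi
    have h2 := hm j hj
    by_cases hij : i < j
    · rw [if_pos hij]
      have inner : ∀ u ∈ Finset.range 9,
          (∑ v ∈ Finset.range 9,
            gf (u : Int) (v : Int) * (if i < j ∧ m i = (u : Int) ∧ m j = (v : Int) then 1 else 0))
          = if m i = (u : Int) then gf (u : Int) (m j) else 0 := by
        intro u _
        by_cases hA : m i = (u : Int)
        · rw [if_pos hA]
          have hv : ∀ v ∈ Finset.range 9,
              gf (u : Int) (v : Int) * (if i < j ∧ m i = (u : Int) ∧ m j = (v : Int) then 1 else 0)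
              = if m j = (v : Int) then gf (u : Int) (v : Int) else 0 := by
            intro v _
            by_cases hB : m j = (v : Int)
            · rw [if_pos ⟨hij, hA, hB⟩, if_pos hB, mul_one]
            · rw [if_neg (by tauto), if_neg hB, mul_zero]
          rw [Finset.sum_congr rfl hv, collapse9 (m j) h2.1 h2.2 (fun v => gf (u : Int) (v : Int))]
          rw [Int.toNat_of_nonneg h2.1]
        · rw [if_neg hA]
          apply Finset.sum_eq_zero
          intro v _
          rw [if_neg (by tauto), mul_zero]
      rw [Finset.sum_congr rfl inner, collapse9 (m i) h1.1 h1.2 (fun u => gf (u : Int) (m j))]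
      rw [Int.toNat_of_nonneg h1.1]
    · rw [if_neg hij]
      symm
      apply Finset.sum_eq_zero
      intro u _
      apply Finset.sum_eq_zero
      intro v _
      rw [if_neg (by tauto), mul_zero]
  rw [Finset.sum_congr rfl (fun i hi => Finset.sum_congr rfl (fun j hj => point i hi j hj))]
  have hswap4 : (∑ i ∈ Finset.range n, ∑ j ∈ Finset.range n, ∑ u ∈ Finset.range 9, ∑ v ∈ Finset.range 9,
        gf (u : Int) (v : Int) * (if i < j ∧ m i = (u : Int) ∧ m j = (v : Int) then 1 else 0))
      = ∑ u ∈ Finset.range 9, ∑ v ∈ Finset.range 9, gf (u : Int) (v : Int) * Nf n m u v := by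
    have e1 : (∑ i ∈ Finset.range n, ∑ j ∈ Finset.range n, ∑ u ∈ Finset.range 9, ∑ v ∈ Finset.range 9,
          gf (u : Int) (v : Int) * (if i < j ∧ m i = (u : Int) ∧ m j = (v : Int) then 1 else 0))
        = ∑ i ∈ Finset.range n, ∑ u ∈ Finset.range 9, ∑ j ∈ Finset.range n, ∑ v ∈ Finset.range 9,
          gf (u : Int) (v : Int) * (if i < j ∧ m i = (u : Int) ∧ m j = (v : Int) then 1 else 0) :=
      Finset.sum_congr rfl (fun i _ => Finset.sum_comm)
    have e2 : (∑ i ∈ Finset.range n, ∑ u ∈ Finset.range 9, ∑ j ∈ Finset.range n, ∑ v ∈ Finset.range 9,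
          gf (u : Int) (v : Int) * (if i < j ∧ m i = (u : Int) ∧ m j = (v : Int) then 1 else 0))
        = ∑ u ∈ Finset.range 9, ∑ i ∈ Finset.range n, ∑ j ∈ Finset.range n, ∑ v ∈ Finset.range 9,
          gf (u : Int) (v : Int) * (if i < j ∧ m i = (u : Int) ∧ m j = (v : Int) then 1 else 0) :=
      Finset.sum_comm
    have e3 : (∑ u ∈ Finset.range 9, ∑ i ∈ Finset.range n, ∑ j ∈ Finset.range n, ∑ v ∈ Finset.range 9,
          gf (u : Int) (v : Int) * (if i < j ∧ m i = (u : Int) ∧ m j = (v : Int) then 1 else 0))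
        = ∑ u ∈ Finset.range 9, ∑ i ∈ Finset.range n, ∑ v ∈ Finset.range 9, ∑ j ∈ Finset.range n,
          gf (u : Int) (v : Int) * (if i < j ∧ m i = (u : Int) ∧ m j = (v : Int) then 1 else 0) :=
      Finset.sum_congr rfl (fun u _ => Finset.sum_congr rfl (fun i _ => Finset.sum_comm))
    have e4 : (∑ u ∈ Finset.range 9, ∑ i ∈ Finset.range n, ∑ v ∈ Finset.range 9, ∑ j ∈ Finset.range n,
          gf (u : Int) (v : Int) * (if i < j ∧ m i = (u : Int) ∧ m j = (v : Int) then 1 else 0))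
        = ∑ u ∈ Finset.range 9, ∑ v ∈ Finset.range 9, ∑ i ∈ Finset.range n, ∑ j ∈ Finset.range n,
          gf (u : Int) (v : Int) * (if i < j ∧ m i = (u : Int) ∧ m j = (v : Int) then 1 else 0) :=
      Finset.sum_congr rfl (fun u _ => Finset.sum_comm)
    rw [e1, e2, e3, e4]
    apply Finset.sum_congr rfl
    intro u _
    apply Finset.sum_congr rfl
    intro v _
    rw [Nf, Finset.mul_sum]
    apply Finset.sum_congr rfl
    intro i _
    rw [Finset.mul_sum]
  rw [hswap4]
  have htri : ∀ u ∈ Finset.range 9, ∀ v ∈ Finset.range 9,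
      gf (u : Int) (v : Int) * Nf n m u v
        = (if u < v then gf (u : Int) (v : Int) * Nf n m u v else 0)
          + (if v < u then gf (u : Int) (v : Int) * Nf n m u v else 0) := by
    intro u hu v hv
    rcases Nat.lt_trichotomy u v with h | h | h
    · rw [if_pos h, if_neg (by omega), add_zero]
    · subst h
      simp [gf_diag9 u hu]
    · rw [if_neg (by omega), if_pos h, zero_add]
  rw [Finset.sum_congr rfl (fun u hu => Finset.sum_congr rfl (fun v hv => htri u hu v hv))]
  rw [Finset.sum_congr rfl (fun u _ => Finset.sum_add_distrib), Finset.sum_add_distrib]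
  have hsecond : (∑ u ∈ Finset.range 9, ∑ v ∈ Finset.range 9,
        if v < u then gf (u : Int) (v : Int) * Nf n m u v else 0)
      = ∑ u ∈ Finset.range 9, ∑ v ∈ Finset.range 9,
        if u < v then gf (u : Int) (v : Int) * Nf n m v u else 0 := by
    rw [Finset.sum_comm]
    apply Finset.sum_congr rfl
    intro u hu
    apply Finset.sum_congr rfl
    intro v hv
    by_cases h : u < v
    · rw [if_pos h, if_pos h, gf_symm9 v hv u hu]
    · rw [if_neg h, if_neg h]
  rw [hsecond, ← Finset.sum_add_distrib]
  apply Finset.sum_congr rfl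
  intro u hu
  rw [← Finset.sum_add_distrib]
  apply Finset.sum_congr rfl
  intro v hv
  by_cases h : u < v
  · rw [if_pos h, if_pos h, if_pos h, ← mul_add, Nf_add n m u v (by omega)]
    show gf (u : Int) (v : Int) * (Cf n m u * Cf n m v) = _
    rw [Cf, Cf, mul_assoc]
  · rw [if_neg h, if_neg h, if_neg h, add_zero]

-- ===== VERDICT (by name: the statement is the Claim_ definition above) =====
theorem cout_regulation_spec : Claim_equal_cout_regulation := by
  intro reg _hdom hpre
  unfold Spec_cout_regulation
  rw [cout_regulation_char, cout_regulation_alt_char]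
  have hstep : (∑ i ∈ Finset.range reg.length, ∑ j ∈ Finset.range reg.length,
        if i < j then gf (wf reg (i : Int)) (wf reg (j : Int)) else 0)
      = ∑ i ∈ Finset.range reg.length, ∑ j ∈ Finset.range reg.length,
        if i < j then gf (mI reg (i : Int)) (mI reg (j : Int)) else 0 := by
    apply Finset.sum_congr rfl
    intro i hi
    apply Finset.sum_congr rfl
    intro j hj
    rw [Finset.mem_range] at hi hj
    by_cases hij : i < j
    · rw [if_pos hij, if_pos hij]
      rcases hpre with hsmall | hb
      · omega
      · have hwi := hb i hi
        have hwj := hb j hj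
        have hi' : wf reg (i : Int) = 3 * (i : Int) + reg.getD i 0 := by
          simp [wf, PySem.List.pyGetD_natCast]
        have hj' : wf reg (j : Int) = 3 * (j : Int) + reg.getD j 0 := by
          simp [wf, PySem.List.pyGetD_natCast]
        have hsmem : wf reg (i : Int) ∈ PySem.List.pyRange (-9) 9 1 := by
          rw [PySem.List.mem_pyRange_one]; omega
        have htmem : wf reg (j : Int) ∈ PySem.List.pyRange (-9) 9 1 := by
          rw [PySem.List.mem_pyRange_one]; omega
        exact gf_mod_all _ hsmem _ htmem
    · rw [if_neg hij, if_neg hij]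
  rw [hstep, pair_sum_by_class reg.length (fun i => mI reg (i : Int))
      (fun i _ => ⟨PySem.Int.mod_nonneg _ (by norm_num), PySem.Int.mod_lt _ (by norm_num)⟩)]
  rfl
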